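-- pv_equiv track=rewrite | github.com/Coki628/kyopro_submissions | CodeForces/1334d.py | gen_arr
-- ===== SOURCE A (Python) =====
-- def gen_arr(v, n):
--     res = [0] * n
--     x = 2
--     for i in range(n-1):
--         if i % 2 == 0:
--             res[i] = v
--         else:
--             res[i] = x
--             x += 1
--     res[-1] = 1
--     return res
-- ===== SOURCE B (Python) =====
-- def gen_arr(v, n):
--     k = (n - 1) // 2
--     body = [e for pair in zip([v] * (k + 1), range(2, k + 3)) for e in pair]
--     return body[:n - 1] + [1]
-- ===== Notes on version B (the rewrite author's own statement) =====
-- stated objective: alternative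
-- what changed: B builds the body by zipping a replicated list of v with the range of counter values 2..k+2 and flattening the (v, counter) pairs, then truncates to length n-1 and appends the final 1, instead of A's preallocated zero array mutated in place by an index loop with a running counter.
-- outside the precondition, e.g. on gen_arr(7, 0): A raises IndexError, B returns [1]
import Mathlib
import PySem

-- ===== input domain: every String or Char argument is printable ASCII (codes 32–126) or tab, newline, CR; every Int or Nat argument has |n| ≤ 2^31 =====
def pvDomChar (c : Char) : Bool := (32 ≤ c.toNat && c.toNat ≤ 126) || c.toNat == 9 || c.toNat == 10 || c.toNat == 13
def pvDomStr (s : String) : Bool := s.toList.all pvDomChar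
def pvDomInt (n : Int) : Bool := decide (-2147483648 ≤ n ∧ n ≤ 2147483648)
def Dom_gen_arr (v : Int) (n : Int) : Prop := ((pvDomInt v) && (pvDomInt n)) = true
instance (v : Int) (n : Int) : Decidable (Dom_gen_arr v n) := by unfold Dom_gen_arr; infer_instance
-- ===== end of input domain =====

-- B builds the body by zipping [v]*(k+1) with the counter range 2..k+2 and flattening the
-- pairs, then truncating, instead of A's in-place index loop with a running counter; objective: alternative.

-- ===== PORT A =====
-- res = [0]*n; for i in range(n-1): even -> v, odd -> x, x += 1; res[-1] = 1
def gen_arr (v : Int) (n : Int) : List Int :=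
  let res := List.replicate n.toNat 0
  let st := (PySem.List.pyRange 0 (n - 1) 1).foldl
    (fun (st : List Int × Int) i =>
      if PySem.Int.mod i 2 == 0 then (PySem.List.pySetD st.1 i v, st.2)
      else (PySem.List.pySetD st.1 i st.2, st.2 + 1))
    (res, 2)
  PySem.List.pySetD st.1 (-1) 1

-- ===== PORT B =====
-- k = (n-1)//2; body = flatten(zip([v]*(k+1), range(2, k+3))); body[:n-1] + [1]
def gen_arr_alt (v : Int) (n : Int) : List Int :=
  let k := PySem.Int.floordiv (n - 1) 2
  let body := (List.zip (List.replicate (k + 1).toNat v) (PySem.List.pyRange 2 (k + 3) 1)).flatMap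
    (fun p => [p.1, p.2])
  PySem.List.slice body none (some (n - 1)) ++ [1]

-- ===== PRECONDITION & SPEC =====
-- A raises IndexError at res[-1] = 1 whenever n <= 0 (res is empty); excluded.
def Pre_gen_arr (v : Int) (n : Int) : Prop := 1 ≤ n
instance (v : Int) (n : Int) : Decidable (Pre_gen_arr v n) := by unfold Pre_gen_arr; infer_instance
def pvWitness_gen_arr : Int × Int := (7, 5)

def Spec_gen_arr (v : Int) (n : Int) (out : List Int) : Prop := out = gen_arr_alt v n
instance (v : Int) (n : Int) (out : List Int) : Decidable (Spec_gen_arr v n out) := by unfold Spec_gen_arr; infer_instance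

-- ===== CLAIM (what is proved, stated in full; the proofs are below) =====
def Claim_equal_gen_arr : Prop := ∀ (v : Int) (n : Int), Dom_gen_arr v n → Pre_gen_arr v n → Spec_gen_arr v n (gen_arr v n)

-- ===== LEMMAS AND PROOFS =====

-- setting the element just past a prefix writes into the head of the suffix
theorem pv_set_append_length {α : Type} (xs ys : List α) (a : α) :
    (xs ++ ys).set xs.length a = xs ++ ys.set 0 a := by
  induction xs with
  | nil => simp
  | cons x xs ih => simp [ih]

-- the per-position value both programs produce at index i (0 ≤ i ≤ n-2)
def pvF (v : Int) (i : Int) : Int :=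
  if PySem.Int.mod i 2 == 0 then v else 2 + PySem.Int.floordiv (i - 1) 2

-- writing cell k of "filled prefix xs ++ zeros"
theorem pv_setD_mid (xs : List Int) (m k : Nat) (hx : xs.length = k) (hkm : k < m) (a : Int) :
    PySem.List.pySetD (xs ++ List.replicate (m - k) 0) (k : Int) a
      = xs ++ a :: List.replicate (m - (k + 1)) 0 := by
  subst hx
  rw [PySem.List.pySetD_natCast, pv_set_append_length]
  have hrep : List.replicate (m - xs.length) (0 : Int)
      = 0 :: List.replicate (m - (xs.length + 1)) 0 := by
    have h1 : m - xs.length = (m - (xs.length + 1)) + 1 := by omega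
    rw [h1, List.replicate_succ]
  rw [hrep]
  simp

-- res[-1] = b on a nonempty list writes the last cell
theorem pv_setD_neg_one_last (xs : List Int) (a b : Int) :
    PySem.List.pySetD (xs ++ [a]) (-1) b = xs ++ [b] := by
  simp only [PySem.List.pySetD, PySem.List.pySet?, PySem.List.pyIdx?]
  have hlen : (xs ++ [a]).length = xs.length + 1 := by simp
  rw [hlen]
  have h1 : ¬ ((0 : Int) ≤ -1) := by norm_num
  have h2 : -((xs.length : Int) + 1) ≤ -1 := by omega
  simp only [h1, if_false, h2, if_pos]
  have h3 : xs.length + 1 - (-(-1 : Int)).toNat = xs.length := by omega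
  rw [h3]
  simp

-- loop invariant for A's fold: after processing range(k), the first k cells hold
-- pvF, the rest are still 0, and the counter x equals 2 + k/2
theorem pv_loop_inv (v : Int) (m k : Nat) (hk : k ≤ m) :
    (PySem.List.pyRange 0 (k : Int) 1).foldl
      (fun (st : List Int × Int) i =>
        if PySem.Int.mod i 2 == 0 then (PySem.List.pySetD st.1 i v, st.2)
        else (PySem.List.pySetD st.1 i st.2, st.2 + 1))
      (List.replicate m 0, 2)
    = (List.map (fun j => pvF v (Int.ofNat j)) (List.range k) ++ List.replicate (m - k) 0,
       2 + (k : Int) / 2) := by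
  induction k with
  | zero => simp
  | succ k ih =>
    have hk' : k ≤ m := Nat.le_of_succ_le hk
    have hsplit : PySem.List.pyRange 0 ((k + 1 : Nat) : Int) 1
        = PySem.List.pyRange 0 (k : Int) 1 ++ [(k : Int)] := by
      push_cast
      exact PySem.List.pyRange_one_succ_right (by positivity)
    rw [hsplit, List.foldl_append, ih hk']
    have hlen : (List.map (fun j => pvF v (Int.ofNat j)) (List.range k)).length = k := by simp
    have hmodE : PySem.Int.mod (k : Int) 2 = (k : Int) % 2 :=
      PySem.Int.mod_eq_emod_of_pos (by norm_num)
    have hrng : List.range (k + 1) = List.range k ++ [k] := List.range_succ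
    by_cases hpar : (k : Int) % 2 = 0
    · have hmod : (PySem.Int.mod (k : Int) 2 == 0) = true := by
        simp [hmodE, hpar]
      simp only [List.foldl_cons, List.foldl_nil, hmod, if_pos]
      rw [pv_setD_mid _ m k hlen (by omega)]
      simp only [Prod.mk.injEq]
      refine ⟨?_, ?_⟩
      · rw [hrng, List.map_append]
        have hv : pvF v ((k : Nat) : Int) = v := by
          simp only [pvF, hmod, if_pos]
        simp [hv]
      · push_cast
        omega
    · have hmod : (PySem.Int.mod (k : Int) 2 == 0) = false := by
        simp [hmodE, hpar]
      simp only [List.foldl_cons, List.foldl_nil, hmod, Bool.false_eq_true, if_false]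
      rw [pv_setD_mid _ m k hlen (by omega)]
      simp only [Prod.mk.injEq]
      refine ⟨?_, ?_⟩
      · rw [hrng, List.map_append]
        have hfd : PySem.Int.floordiv ((k : Int) - 1) 2 = ((k : Int) - 1) / 2 :=
          PySem.Int.floordiv_eq_ediv_of_pos (by norm_num)
        have hv : pvF v ((k : Nat) : Int) = 2 + (k : Int) / 2 := by
          simp only [pvF, hmod, Bool.false_eq_true, if_false, hfd]
          have hk0 : (0 : Int) ≤ (k : Int) := Int.natCast_nonneg k
          omega
        simp [hv]
      · push_cast
        omega

-- A's shape: on n ≥ 1, gen_arr is pvF over 0..n-2 followed by 1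
theorem pv_gen_arr_eq (v : Int) (m : Nat) (hm : 1 ≤ m) :
    gen_arr v (m : Int) = List.map (fun j => pvF v (Int.ofNat j)) (List.range (m - 1)) ++ [1] := by
  simp only [gen_arr]
  have hsub : (m : Int) - 1 = ((m - 1 : Nat) : Int) := by omega
  have htn : ((m : Int)).toNat = m := by omega
  rw [htn, hsub, pv_loop_inv v m (m - 1) (Nat.sub_le m 1)]
  have hrep : m - (m - 1) = 1 := by omega
  rw [hrep]
  have hone : List.replicate 1 (0 : Int) = [0] := rfl
  rw [hone, pv_setD_neg_one_last]

-- zip of a replicated constant against a list of the same length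
theorem pv_zip_replicate {α β : Type} (a : α) (ys : List β) :
    List.zip (List.replicate ys.length a) ys = ys.map (fun y => (a, y)) := by
  induction ys with
  | nil => simp
  | cons y ys ih => simp [List.replicate_succ, ih]

-- flattening the (v, 2+t) pairs over range c yields pvF over range (2*c)
theorem pv_flat_eq (v : Int) (c : Nat) :
    (List.range c).flatMap (fun (t : Nat) => [v, (2 : Int) + (t : Int)])
      = List.map (fun j => pvF v (Int.ofNat j)) (List.range (2 * c)) := by
  induction c with
  | zero => simp
  | succ c ih =>
    rw [List.range_succ, List.flatMap_append, ih]
    have h2 : 2 * (c + 1) = (2 * c + 1) + 1 := by omega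
    rw [h2, List.range_succ, List.range_succ, List.map_append, List.map_append]
    have he : pvF v (2 * (c : Int)) = v := by
      have hm : PySem.Int.mod (2 * (c : Int)) 2 = (2 * (c : Int)) % 2 :=
        PySem.Int.mod_eq_emod_of_pos (by norm_num)
      have h0 : (2 * (c : Int)) % 2 = 0 := by omega
      rw [show pvF v (2 * (c : Int)) = if PySem.Int.mod (2 * (c : Int)) 2 == 0 then v else 2 + PySem.Int.floordiv (2 * (c : Int) - 1) 2 from rfl, hm, h0]
      simp
    have ho : pvF v (2 * (c : Int) + 1) = 2 + (c : Int) := by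
      have hm : PySem.Int.mod (2 * (c : Int) + 1) 2 = (2 * (c : Int) + 1) % 2 :=
        PySem.Int.mod_eq_emod_of_pos (by norm_num)
      have h1 : (2 * (c : Int) + 1) % 2 = 1 := by omega
      have hfd : PySem.Int.floordiv (2 * (c : Int) + 1 - 1) 2 = (2 * (c : Int) + 1 - 1) / 2 :=
        PySem.Int.floordiv_eq_ediv_of_pos (by norm_num)
      simp only [pvF, hm, h1, hfd]
      norm_num
    simp [he, ho, List.append_assoc]

-- ===== VERDICT (by name: the statement is the Claim_ definition above) =====
theorem gen_arr_spec : Claim_equal_gen_arr := by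
  intro v n _ hpre
  unfold Pre_gen_arr at hpre
  unfold Spec_gen_arr
  obtain ⟨m, rfl⟩ : ∃ m : Nat, n = (m : Int) := ⟨n.toNat, by omega⟩
  have hm1 : 1 ≤ m := by omega
  rw [pv_gen_arr_eq v m hm1]
  simp only [gen_arr_alt]
  -- k = (m-1) // 2 as a natural number
  have hfd : PySem.Int.floordiv ((m : Int) - 1) 2 = ((m : Int) - 1) / 2 :=
    PySem.Int.floordiv_eq_ediv_of_pos (by norm_num)
  set kn : Nat := (m - 1) / 2 with hkn
  have hkInt : PySem.Int.floordiv ((m : Int) - 1) 2 = (kn : Int) := by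
    rw [hfd, hkn]; omega
  rw [hkInt]
  have htn : ((kn : Int) + 1).toNat = kn + 1 := by omega
  rw [htn]
  -- the counter range is 2+t for t in range (kn+1)
  have hrng : PySem.List.pyRange 2 ((kn : Int) + 3) 1
      = (List.range (kn + 1)).map (fun (t : Nat) => (2 : Int) + (t : Int)) := by
    rw [PySem.List.pyRange_one]
    have h21 : ((kn : Int) + 3 - 2).toNat = kn + 1 := by omega
    rw [h21]
  rw [hrng]
  have hlen : ((List.range (kn + 1)).map (fun (t : Nat) => (2 : Int) + (t : Int))).length = kn + 1 := by
    simp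
  have hzip := pv_zip_replicate v ((List.range (kn + 1)).map (fun (t : Nat) => (2 : Int) + (t : Int)))
  rw [hlen] at hzip
  rw [hzip, List.flatMap_map, List.flatMap_map]
  have hflat : List.flatMap
        (fun (a : Nat) => [(v, (2 : Int) + (a : Int)).1, (v, (2 : Int) + (a : Int)).2])
        (List.range (kn + 1))
      = List.map (fun j => pvF v (Int.ofNat j)) (List.range (2 * (kn + 1))) := by
    rw [← pv_flat_eq v (kn + 1)]
  rw [hflat]
  -- slice [:m-1] is take (m-1)
  have hsub : (m : Int) - 1 = ((m - 1 : Nat) : Int) := by omega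
  rw [hsub, PySem.List.slice_to_natCast, ← List.map_take, List.take_range]
  have hmin : min (m - 1) (2 * (kn + 1)) = m - 1 := by omega
  rw [hmin]
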